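-- pv_equiv track=rewrite | github.com/c4rlosr4ul/Solid-State | extr-viz.py | get_structure_sequences
-- ===== SOURCE A (Python) =====
-- from itertools import permutations
--
-- def is_sc_allowed(h, k, l):
--     return True
--
-- def is_bcc_allowed(h, k, l):
--     return (h + k + l) % 2 == 0
--
-- def is_fcc_allowed(h, k, l):
--     return (all(x % 2 == 0 for x in (h, k, l)) or
--             all(x % 2 == 1 for x in (h, k, l)))
--
-- def is_diamond_allowed(h, k, l):
--     all_odd = all(x % 2 == 1 for x in (h, k, l))
--     all_even = all(x % 2 == 0 for x in (h, k, l))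
--     sum_multiple_4 = (h + k + l) % 4 == 0
--     return all_odd or (all_even and sum_multiple_4)
--
-- def is_hcp_allowed(h, k, l):
--     if l % 2 == 0:  # L even
--         return (h + 2*k) % 3 == 0
--     else:  # L odd
--         return (h + 2*k) % 3 != 0
--
-- def get_all_permutations(h, k, l):
--     perms = set(permutations([h, k, l]))
--     return sorted(list(perms))
--
-- def generate_reflections_with_permutations(max_index, structure_type):
--     sums_dict = {}
--     for h in range(max_index + 1):
--         for k in range(max_index + 1):
--             for l in range(max_index + 1):
--                 if h == k == l == 0:
--                     continue
--                 squared_sum = h*h + k*k + l*l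
--
--                 is_allowed = False
--                 if structure_type == "sc" and is_sc_allowed(h, k, l):
--                     is_allowed = True
--                 elif structure_type == "bcc" and is_bcc_allowed(h, k, l):
--                     is_allowed = True
--                 elif structure_type == "fcc" and is_fcc_allowed(h, k, l):
--                     is_allowed = True
--                 elif structure_type == "diamond" and is_diamond_allowed(h, k, l):
--                     is_allowed = True
--                 elif structure_type == "hcp" and is_hcp_allowed(h, k, l):
--                     is_allowed = True
--
--                 if is_allowed:
--                     if squared_sum not in sums_dict:
--                         sums_dict[squared_sum] = set()
--
--                     if structure_type == "hcp":
--                         sums_dict[squared_sum].add((h, k, l))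
--                     else:
--                         all_perms = get_all_permutations(h, k, l)
--                         for perm in all_perms:
--                             if structure_type == "sc" and is_sc_allowed(*perm):
--                                 sums_dict[squared_sum].add(perm)
--                             elif structure_type == "bcc" and is_bcc_allowed(*perm):
--                                 sums_dict[squared_sum].add(perm)
--                             elif structure_type == "fcc" and is_fcc_allowed(*perm):
--                                 sums_dict[squared_sum].add(perm)
--                             elif structure_type == "diamond" and is_diamond_allowed(*perm):
--                                 sums_dict[squared_sum].add(perm)
--
--     return sorted([(sum_, list(perms)) for sum_, perms in sums_dict.items()])
--
-- def get_structure_sequences(max_index=5, max_value=None):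
--     sequences = {}
--     for structure_type in ["sc", "bcc", "fcc", "diamond", "hcp"]:
--         reflections = generate_reflections_with_permutations(max_index, structure_type)
--         sequence = [sum_ for sum_, _ in reflections]
--         if max_value is not None:
--             sequence = [x for x in sequence if x <= max_value]
--         sequences[structure_type.upper()] = sequence
--     return sequences
-- ===== SOURCE B (Python) =====
-- # B: one pass over the (h,k,l) cube maintaining five plain int-sets (no permutation
-- # bookkeeping, no dict of tuple-sets): a reflection's squared sum is all we ever need.
-- def get_structure_sequences(max_index=5, max_value=None):
--     sc, bcc, fcc, dia, hcp = set(), set(), set(), set(), set()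
--     for h in range(max_index + 1):
--         for k in range(max_index + 1):
--             for l in range(max_index + 1):
--                 if h == 0 and k == 0 and l == 0:
--                     continue
--                 s = h * h + k * k + l * l
--                 sc.add(s)
--                 if (h + k + l) % 2 == 0:
--                     bcc.add(s)
--                 if h % 2 == k % 2 == l % 2:
--                     fcc.add(s)
--                     if h % 2 == 1 or (h + k + l) % 4 == 0:
--                         dia.add(s)
--                 if (l % 2 == 0) == ((h + 2 * k) % 3 == 0):
--                     hcp.add(s)
--     def seq(vals):
--         out = sorted(vals)
--         if max_value is not None:
--             out = [x for x in out if x <= max_value]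
--         return out
--     return {"SC": seq(sc), "BCC": seq(bcc), "FCC": seq(fcc),
--             "DIAMOND": seq(dia), "HCP": seq(hcp)}
-- ===== Notes on version B (the rewrite author's own statement) =====
-- stated objective: simpler
-- what changed: Replaces the five separate cube scans that each build a dict{squared_sum: set[(h,k,l)-permutations]} (generating, sorting and re-testing all permutations of every allowed reflection) with a single pass over the (h,k,l) cube that maintains five plain set[int] of squared sums, since only the distinct sums are ever returned.
import Mathlib
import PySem

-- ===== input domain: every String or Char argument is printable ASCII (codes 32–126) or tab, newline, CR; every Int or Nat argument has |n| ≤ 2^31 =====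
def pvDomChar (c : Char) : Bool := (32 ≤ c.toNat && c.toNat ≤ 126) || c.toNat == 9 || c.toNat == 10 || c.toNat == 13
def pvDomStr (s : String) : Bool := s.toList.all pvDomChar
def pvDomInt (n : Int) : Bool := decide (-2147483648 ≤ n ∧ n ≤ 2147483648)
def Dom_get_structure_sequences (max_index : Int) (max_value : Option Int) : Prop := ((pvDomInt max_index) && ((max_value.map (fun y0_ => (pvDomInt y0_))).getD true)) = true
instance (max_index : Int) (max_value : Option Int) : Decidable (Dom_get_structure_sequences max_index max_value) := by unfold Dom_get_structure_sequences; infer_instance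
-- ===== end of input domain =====

-- B replaces A's five dict-of-permutation-set passes by one cube pass over five plain
-- int-sets (only the distinct squared sums are ever returned): simpler bookkeeping.

-- ===== PORT A =====
def is_sc_allowed (_h _k _l : Int) : Bool := true

def is_bcc_allowed (h k l : Int) : Bool := PySem.Int.mod (h + k + l) 2 == 0

def is_fcc_allowed (h k l : Int) : Bool :=
  ([h, k, l].all fun x => PySem.Int.mod x 2 == 0) || ([h, k, l].all fun x => PySem.Int.mod x 2 == 1)

def is_diamond_allowed (h k l : Int) : Bool :=
  let all_odd := [h, k, l].all fun x => PySem.Int.mod x 2 == 1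
  let all_even := [h, k, l].all fun x => PySem.Int.mod x 2 == 0
  let sum_multiple_4 := PySem.Int.mod (h + k + l) 4 == 0
  all_odd || (all_even && sum_multiple_4)

def is_hcp_allowed (h k l : Int) : Bool :=
  if PySem.Int.mod l 2 == 0 then PySem.Int.mod (h + 2 * k) 3 == 0
  else !(PySem.Int.mod (h + 2 * k) 3 == 0)

-- itertools.permutations of the 3-list as tuples, set-deduplicated, then sorted;
-- Python compares int tuples lexicographically = Lean's List Int lexicographic order.
def get_all_permutations (h k l : Int) : List (Int × Int × Int) :=
  let perms : PySem.Set (Int × Int × Int) := PySem.Set.ofList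
    ((PySem.List.permutations [h, k, l] 3).map fun p =>
      match p with
      | [a, b, c] => (a, b, c)
      | _ => (0, 0, 0))  -- unreachable: 3-permutations of a 3-list
  PySem.List.sorted perms (fun t => [t.1, t.2.1, t.2.2])

-- the body of A's innermost loop (named so the proofs can speak about it)
def pvA_body (structure_type : String) (h k l : Int)
    (d : PySem.Dict Int (PySem.Set (Int × Int × Int))) :
    PySem.Dict Int (PySem.Set (Int × Int × Int)) :=
  if h == k && k == l && l == 0 then d
  else
    let squared_sum := h * h + k * k + l * l
    let is_allowed :=
      if structure_type == "sc" && is_sc_allowed h k l then true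
      else if structure_type == "bcc" && is_bcc_allowed h k l then true
      else if structure_type == "fcc" && is_fcc_allowed h k l then true
      else if structure_type == "diamond" && is_diamond_allowed h k l then true
      else if structure_type == "hcp" && is_hcp_allowed h k l then true
      else false
    if is_allowed then
      let d := if (d.get? squared_sum).isNone then d.insert squared_sum [] else d
      if structure_type == "hcp" then
        d.modify squared_sum [] (fun s => PySem.Set.add s (h, k, l))
      else
        (get_all_permutations h k l).foldl (fun d perm =>
          if structure_type == "sc" && is_sc_allowed perm.1 perm.2.1 perm.2.2 then
            d.modify squared_sum [] (fun s => PySem.Set.add s perm)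
          else if structure_type == "bcc" && is_bcc_allowed perm.1 perm.2.1 perm.2.2 then
            d.modify squared_sum [] (fun s => PySem.Set.add s perm)
          else if structure_type == "fcc" && is_fcc_allowed perm.1 perm.2.1 perm.2.2 then
            d.modify squared_sum [] (fun s => PySem.Set.add s perm)
          else if structure_type == "diamond" && is_diamond_allowed perm.1 perm.2.1 perm.2.2 then
            d.modify squared_sum [] (fun s => PySem.Set.add s perm)
          else d) d
    else d

def pvA_loop1 (t : String) (h k : Int) (L : List Int)
    (d : PySem.Dict Int (PySem.Set (Int × Int × Int))) :
    PySem.Dict Int (PySem.Set (Int × Int × Int)) :=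
  L.foldl (fun d l => pvA_body t h k l d) d

def pvA_loop2 (t : String) (h : Int) (L rng : List Int)
    (d : PySem.Dict Int (PySem.Set (Int × Int × Int))) :
    PySem.Dict Int (PySem.Set (Int × Int × Int)) :=
  L.foldl (fun d k => pvA_loop1 t h k rng d) d

def pvA_loop3 (t : String) (L rng : List Int)
    (d : PySem.Dict Int (PySem.Set (Int × Int × Int))) :
    PySem.Dict Int (PySem.Set (Int × Int × Int)) :=
  L.foldl (fun d h => pvA_loop2 t h rng rng d) d

def generate_reflections_with_permutations (max_index : Int) (structure_type : String) :
    List (Int × PySem.Set (Int × Int × Int)) :=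
  let rng := PySem.List.pyRange 0 (max_index + 1) 1
  let sums_dict := pvA_loop3 structure_type rng rng (PySem.Dict.mk [])
  -- Python sorts the (sum_, list(perms)) pairs; the dict keys are distinct, so tuple
  -- comparison never reaches the second component: sort with key = first component.
  -- (list(perms) of a PySem.Set is its underlying list, the identity.)
  PySem.List.sorted sums_dict.items (fun p => p.1)

def get_structure_sequences (max_index : Int) (max_value : Option Int) : List (String × List Int) :=
  (["sc", "bcc", "fcc", "diamond", "hcp"].foldl
    (fun (sequences : PySem.Dict String (List Int)) structure_type =>
      let reflections := generate_reflections_with_permutations max_index structure_type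
      let sequence := reflections.map fun p => p.1
      let sequence :=
        match max_value with
        | none => sequence
        | some m => sequence.filter fun x => x ≤ m
      sequences.insert (PySem.Str.upper structure_type) sequence)
    (PySem.Dict.mk [])).items

-- ===== PORT B =====
abbrev pvS5 := PySem.Set Int × PySem.Set Int × PySem.Set Int × PySem.Set Int × PySem.Set Int

-- the body of B's single cube loop
def pvB_body (h k l : Int) (st : pvS5) : pvS5 :=
  if h == 0 && k == 0 && l == 0 then st
  else
    let s := h * h + k * k + l * l
    let (sc, bcc, fcc, dia, hcp) := st
    let sc := PySem.Set.add sc s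
    let bcc := if PySem.Int.mod (h + k + l) 2 == 0 then PySem.Set.add bcc s else bcc
    let (fcc, dia) :=
      if PySem.Int.mod h 2 == PySem.Int.mod k 2 && PySem.Int.mod k 2 == PySem.Int.mod l 2 then
        (PySem.Set.add fcc s,
         if PySem.Int.mod h 2 == 1 || PySem.Int.mod (h + k + l) 4 == 0 then PySem.Set.add dia s
         else dia)
      else (fcc, dia)
    let hcp :=
      if (PySem.Int.mod l 2 == 0) == (PySem.Int.mod (h + 2 * k) 3 == 0) then PySem.Set.add hcp s
      else hcp
    (sc, bcc, fcc, dia, hcp)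

def pvB_loop1 (h k : Int) (L : List Int) (st : pvS5) : pvS5 :=
  L.foldl (fun st l => pvB_body h k l st) st

def pvB_loop2 (h : Int) (L rng : List Int) (st : pvS5) : pvS5 :=
  L.foldl (fun st k => pvB_loop1 h k rng st) st

def pvB_loop3 (L rng : List Int) (st : pvS5) : pvS5 :=
  L.foldl (fun st h => pvB_loop2 h rng rng st) st

def pvB_seq (max_value : Option Int) (v : PySem.Set Int) : List Int :=
  let out := PySem.List.sorted v (fun x => x)
  match max_value with
  | none => out
  | some m => out.filter fun x => x ≤ m

def get_structure_sequences_alt (max_index : Int) (max_value : Option Int) :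
    List (String × List Int) :=
  let rng := PySem.List.pyRange 0 (max_index + 1) 1
  let st := pvB_loop3 rng rng ([], [], [], [], [])
  [("SC", pvB_seq max_value st.1), ("BCC", pvB_seq max_value st.2.1),
   ("FCC", pvB_seq max_value st.2.2.1), ("DIAMOND", pvB_seq max_value st.2.2.2.1),
   ("HCP", pvB_seq max_value st.2.2.2.2)]

-- ===== PRECONDITION & SPEC =====
def Spec_get_structure_sequences (max_index : Int) (max_value : Option Int) (out : List (String × List Int)) : Prop := out = get_structure_sequences_alt max_index max_value
instance (max_index : Int) (max_value : Option Int) (out : List (String × List Int)) : Decidable (Spec_get_structure_sequences max_index max_value out) := by unfold Spec_get_structure_sequences; infer_instance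

-- ===== CLAIM (what is proved, stated in full; the proofs are below) =====
def Claim_equal_get_structure_sequences : Prop := ∀ (max_index : Int) (max_value : Option Int), Dom_get_structure_sequences max_index max_value → Spec_get_structure_sequences max_index max_value (get_structure_sequences max_index max_value)

-- ===== LEMMAS AND PROOFS =====

def pvKeys (d : PySem.Dict Int (PySem.Set (Int × Int × Int))) : List Int :=
  d.items.map Prod.fst

def pvInv (d1 d2 d3 d4 d5 : PySem.Dict Int (PySem.Set (Int × Int × Int))) (st : pvS5) : Prop :=
  pvKeys d1 = st.1 ∧ pvKeys d2 = st.2.1 ∧ pvKeys d3 = st.2.2.1 ∧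
  pvKeys d4 = st.2.2.2.1 ∧ pvKeys d5 = st.2.2.2.2

theorem pvKeys_ensure (d : PySem.Dict Int (PySem.Set (Int × Int × Int))) (q : Int) :
    pvKeys (if (d.get? q).isNone then d.insert q [] else d) = PySem.Set.add (pvKeys d) q := by
  by_cases hq : q ∈ pvKeys d
  · have hfind : ((d.items.find? fun p => p.1 == q)).isSome = true := by
      obtain ⟨p, hp, hpq⟩ := List.mem_map.mp hq
      exact List.find?_isSome.mpr ⟨p, hp, by simp [hpq]⟩
    have hnone : (d.get? q).isNone = false := by
      rcases ho : d.items.find? fun p => p.1 == q with _ | p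
      · rw [ho] at hfind; simp at hfind
      · simp [PySem.Dict.get?, ho]
    rw [if_neg (by simp [hnone])]
    simp [PySem.Set.add, hq]
  · have hnone : (d.get? q).isNone = true := by
      have : (d.items.find? fun p => p.1 == q) = none := by
        refine List.find?_eq_none.mpr fun p hp hpq => ?_
        exact hq (List.mem_map.mpr ⟨p, hp, by simpa using hpq⟩)
      simp [PySem.Dict.get?, this]
    rw [if_pos hnone]
    have hc : d.contains q = false := by
      refine Bool.eq_false_iff.mpr fun hcon => ?_
      obtain ⟨p, hp, hpq⟩ := List.any_eq_true.mp hcon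
      exact hq (List.mem_map.mpr ⟨p, hp, by simpa using hpq⟩)
    simp [PySem.Dict.insert, hc, pvKeys, PySem.Set.add]
    intro x hx
    exact hq (List.mem_map.mpr ⟨(q, x), hx, rfl⟩)

theorem pvMem_ensure (d : PySem.Dict Int (PySem.Set (Int × Int × Int))) (q : Int) :
    q ∈ pvKeys (if (d.get? q).isNone then d.insert q [] else d) := by
  rw [pvKeys_ensure]
  by_cases hq : q ∈ pvKeys d <;> simp [PySem.Set.add, hq]

theorem pvKeys_modify_of_mem (d : PySem.Dict Int (PySem.Set (Int × Int × Int))) (q : Int)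
    (dflt : PySem.Set (Int × Int × Int)) (f : PySem.Set (Int × Int × Int) → PySem.Set (Int × Int × Int))
    (hq : q ∈ pvKeys d) : pvKeys (d.modify q dflt f) = pvKeys d := by
  have hc : d.contains q = true := by
    obtain ⟨p, hp, hpq⟩ := List.mem_map.mp hq
    exact List.any_eq_true.mpr ⟨p, hp, by simp [hpq]⟩
  simp only [PySem.Dict.modify, PySem.Dict.insert, hc, if_true, pvKeys, List.map_map]
  refine List.map_congr_left fun p hp => ?_
  by_cases hb : (p.1 == q) = true
  · simp [Function.comp, eq_of_beq hb]
  · simp [Function.comp, hb]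

theorem pvKeys_permfold (perms : List (Int × Int × Int)) (q : Int)
    (F : PySem.Dict Int (PySem.Set (Int × Int × Int)) → (Int × Int × Int) → PySem.Dict Int (PySem.Set (Int × Int × Int)))
    (hF : ∀ d p, F d p = d ∨ F d p = d.modify q [] (fun s => PySem.Set.add s p))
    (d : PySem.Dict Int (PySem.Set (Int × Int × Int))) (hq : q ∈ pvKeys d) :
    pvKeys (perms.foldl F d) = pvKeys d := by
  induction perms generalizing d with
  | nil => rfl
  | cons p ps ih =>
    rw [List.foldl_cons]
    rcases hF d p with hE | hE <;> rw [hE]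
    · exact ih d hq
    · rw [ih _ (by rw [pvKeys_modify_of_mem d q _ _ hq]; exact hq),
        pvKeys_modify_of_mem d q _ _ hq]

theorem pv_guard_eq (h k l : Int) :
    (h == k && k == l && l == 0) = (h == 0 && k == 0 && l == 0) := by
  rw [Bool.eq_iff_iff]
  simp only [Bool.and_eq_true, beq_iff_eq]
  omega

theorem pv_fcc_eq (h k l : Int) :
    is_fcc_allowed h k l
      = (PySem.Int.mod h 2 == PySem.Int.mod k 2 && PySem.Int.mod k 2 == PySem.Int.mod l 2) := by
  rcases PySem.Int.mod_two_eq h with hh | hh <;> rcases PySem.Int.mod_two_eq k with hk | hk <;>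
    rcases PySem.Int.mod_two_eq l with hl | hl <;>
      simp only [is_fcc_allowed, List.all_cons, List.all_nil, hh, hk, hl] <;> decide

theorem pv_dia_eq (h k l : Int) :
    is_diamond_allowed h k l
      = ((PySem.Int.mod h 2 == PySem.Int.mod k 2 && PySem.Int.mod k 2 == PySem.Int.mod l 2)
         && (PySem.Int.mod h 2 == 1 || PySem.Int.mod (h + k + l) 4 == 0)) := by
  rcases PySem.Int.mod_two_eq h with hh | hh <;> rcases PySem.Int.mod_two_eq k with hk | hk <;>
    rcases PySem.Int.mod_two_eq l with hl | hl <;>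
      simp only [is_diamond_allowed, List.all_cons, List.all_nil, hh, hk, hl] <;>
      cases hc4 : (PySem.Int.mod (h + k + l) 4 == 0) <;> decide

theorem pv_hcp_eq (h k l : Int) :
    is_hcp_allowed h k l
      = ((PySem.Int.mod l 2 == 0) == (PySem.Int.mod (h + 2 * k) 3 == 0)) := by
  cases hl2 : (PySem.Int.mod l 2 == 0) <;> cases hc : (PySem.Int.mod (h + 2 * k) 3 == 0) <;>
    simp only [is_hcp_allowed, hl2, hc] <;> decide

theorem pvStep_keys (h k l : Int) (d : PySem.Dict Int (PySem.Set (Int × Int × Int))) (q : Int)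
    (F : PySem.Dict Int (PySem.Set (Int × Int × Int)) → (Int × Int × Int) → PySem.Dict Int (PySem.Set (Int × Int × Int)))
    (hF : ∀ d p, F d p = d ∨ F d p = d.modify q [] (fun s => PySem.Set.add s p)) :
    pvKeys ((get_all_permutations h k l).foldl F (if (d.get? q).isNone then d.insert q [] else d))
      = PySem.Set.add (pvKeys d) q := by
  rw [pvKeys_permfold _ q F hF _ (pvMem_ensure d q), pvKeys_ensure]

theorem pvStep_keys_hcp (h k l : Int) (d : PySem.Dict Int (PySem.Set (Int × Int × Int))) (q : Int) :
    pvKeys ((if (d.get? q).isNone then d.insert q [] else d).modify q []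
        (fun s => PySem.Set.add s (h, k, l)))
      = PySem.Set.add (pvKeys d) q := by
  rw [pvKeys_modify_of_mem _ q _ _ (pvMem_ensure d q), pvKeys_ensure]

theorem pvBody_inv (h k l : Int) (d1 d2 d3 d4 d5 : PySem.Dict Int (PySem.Set (Int × Int × Int)))
    (st : pvS5) (H : pvInv d1 d2 d3 d4 d5 st) :
    pvInv (pvA_body "sc" h k l d1) (pvA_body "bcc" h k l d2) (pvA_body "fcc" h k l d3)
      (pvA_body "diamond" h k l d4) (pvA_body "hcp" h k l d5) (pvB_body h k l st) := by
  obtain ⟨s1, s2, s3, s4, s5⟩ := st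
  obtain ⟨H1, H2, H3, H4, H5⟩ := H
  unfold pvA_body pvB_body
  simp only [pv_guard_eq]
  by_cases h0 : (h == 0 && k == 0 && l == 0) = true
  · simp only [h0, if_true]
    exact ⟨H1, H2, H3, H4, H5⟩
  · simp only [Bool.not_eq_true] at h0
    simp only [h0, Bool.false_eq_true, if_false]
    refine ⟨?_, ?_, ?_, ?_, ?_⟩
    · -- SC
      simp only [is_sc_allowed, Bool.and_true]
      rw [show (("sc" : String) == "sc") = true from rfl,
        show (("sc" : String) == "hcp") = false from rfl]
      simp only [if_true, Bool.false_eq_true, if_false]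
      rw [pvStep_keys h k l d1 _ _ (by
        intro d p
        simp), H1]
    · -- BCC
      simp only [show (("bcc" : String) == "sc") = false from rfl,
        show (("bcc" : String) == "bcc") = true from rfl,
        show (("bcc" : String) == "hcp") = false from rfl,
        Bool.false_and, Bool.true_and, Bool.false_eq_true, if_false]
      by_cases hb : (PySem.Int.mod (h + k + l) 2 == 0) = true
      · rw [show is_bcc_allowed h k l = true from hb]
        simp only [if_true, hb]
        rw [pvStep_keys h k l d2 _ _ (by
          intro d p
          (try split_ifs) <;> simp), H2]
      · rw [show is_bcc_allowed h k l = (PySem.Int.mod (h + k + l) 2 == 0) from rfl]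
        simp only [Bool.not_eq_true] at hb
        simp only [hb, Bool.false_eq_true, if_false]
        exact H2
    · -- FCC
      simp only [show (("fcc" : String) == "sc") = false from rfl,
        show (("fcc" : String) == "bcc") = false from rfl,
        show (("fcc" : String) == "fcc") = true from rfl,
        show (("fcc" : String) == "hcp") = false from rfl,
        Bool.false_and, Bool.true_and, Bool.false_eq_true, if_false]
      rw [pv_fcc_eq]
      by_cases hb : (PySem.Int.mod h 2 == PySem.Int.mod k 2
          && PySem.Int.mod k 2 == PySem.Int.mod l 2) = true
      · simp only [hb, if_true]
        rw [pvStep_keys h k l d3 _ _ (by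
          intro d p
          (try split_ifs) <;> simp), H3]
      · simp only [Bool.not_eq_true] at hb
        simp only [hb, Bool.false_eq_true, if_false]
        exact H3
    · -- DIAMOND
      simp only [show (("diamond" : String) == "sc") = false from rfl,
        show (("diamond" : String) == "bcc") = false from rfl,
        show (("diamond" : String) == "fcc") = false from rfl,
        show (("diamond" : String) == "diamond") = true from rfl,
        show (("diamond" : String) == "hcp") = false from rfl,
        Bool.false_and, Bool.true_and, Bool.false_eq_true, if_false]
      rw [pv_dia_eq]
      by_cases hsp : (PySem.Int.mod h 2 == PySem.Int.mod k 2
          && PySem.Int.mod k 2 == PySem.Int.mod l 2) = true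
      · by_cases hd2 : (PySem.Int.mod h 2 == 1 || PySem.Int.mod (h + k + l) 4 == 0) = true
        · simp only [hsp, hd2, Bool.and_true, if_true]
          rw [pvStep_keys h k l d4 _ _ (by
            intro d p
            (try split_ifs) <;> simp), H4]
        · simp only [Bool.not_eq_true] at hd2
          simp only [hsp, hd2, Bool.and_false, Bool.false_eq_true, if_false, if_true]
          exact H4
      · simp only [Bool.not_eq_true] at hsp
        simp only [hsp, Bool.false_and, Bool.false_eq_true, if_false]
        exact H4
    · -- HCP
      simp only [show (("hcp" : String) == "sc") = false from rfl,
        show (("hcp" : String) == "bcc") = false from rfl,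
        show (("hcp" : String) == "fcc") = false from rfl,
        show (("hcp" : String) == "diamond") = false from rfl,
        show (("hcp" : String) == "hcp") = true from rfl,
        Bool.false_and, Bool.true_and, Bool.false_eq_true, if_false, if_true]
      rw [pv_hcp_eq]
      by_cases hb : ((PySem.Int.mod l 2 == 0) == (PySem.Int.mod (h + 2 * k) 3 == 0)) = true
      · simp only [hb, if_true]
        rw [pvStep_keys_hcp h k l d5 _, H5]
      · simp only [Bool.not_eq_true] at hb
        simp only [hb, Bool.false_eq_true, if_false]
        exact H5

theorem pvLoop1_inv (h k : Int) (L : List Int)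
    (d1 d2 d3 d4 d5 : PySem.Dict Int (PySem.Set (Int × Int × Int))) (st : pvS5)
    (H : pvInv d1 d2 d3 d4 d5 st) :
    pvInv (pvA_loop1 "sc" h k L d1) (pvA_loop1 "bcc" h k L d2) (pvA_loop1 "fcc" h k L d3)
      (pvA_loop1 "diamond" h k L d4) (pvA_loop1 "hcp" h k L d5) (pvB_loop1 h k L st) := by
  induction L generalizing d1 d2 d3 d4 d5 st with
  | nil => exact H
  | cons x L ih => exact ih _ _ _ _ _ _ (pvBody_inv h k x d1 d2 d3 d4 d5 st H)

theorem pvLoop2_inv (h : Int) (L rng : List Int)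
    (d1 d2 d3 d4 d5 : PySem.Dict Int (PySem.Set (Int × Int × Int))) (st : pvS5)
    (H : pvInv d1 d2 d3 d4 d5 st) :
    pvInv (pvA_loop2 "sc" h L rng d1) (pvA_loop2 "bcc" h L rng d2) (pvA_loop2 "fcc" h L rng d3)
      (pvA_loop2 "diamond" h L rng d4) (pvA_loop2 "hcp" h L rng d5) (pvB_loop2 h L rng st) := by
  induction L generalizing d1 d2 d3 d4 d5 st with
  | nil => exact H
  | cons x L ih => exact ih _ _ _ _ _ _ (pvLoop1_inv h x rng d1 d2 d3 d4 d5 st H)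

theorem pvLoop3_inv (L rng : List Int)
    (d1 d2 d3 d4 d5 : PySem.Dict Int (PySem.Set (Int × Int × Int))) (st : pvS5)
    (H : pvInv d1 d2 d3 d4 d5 st) :
    pvInv (pvA_loop3 "sc" L rng d1) (pvA_loop3 "bcc" L rng d2) (pvA_loop3 "fcc" L rng d3)
      (pvA_loop3 "diamond" L rng d4) (pvA_loop3 "hcp" L rng d5) (pvB_loop3 L rng st) := by
  induction L generalizing d1 d2 d3 d4 d5 st with
  | nil => exact H
  | cons x L ih => exact ih _ _ _ _ _ _ (pvLoop2_inv x rng rng d1 d2 d3 d4 d5 st H)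

theorem pv_mapfst_sorted (l : List (Int × PySem.Set (Int × Int × Int))) :
    (PySem.List.sorted l (fun p => p.1)).map (fun p => p.1)
      = PySem.List.sorted (l.map (fun p => p.1)) (fun x => x) := by
  refine List.Perm.eq_of_pairwise (le := fun a b => a ≤ b)
    (fun a b _ _ hab hba => le_antisymm hab hba) ?_ ?_ ?_
  · exact List.pairwise_map.mpr (PySem.List.sorted_pairwise l (fun p => p.1))
  · simpa using PySem.List.sorted_pairwise (l.map (fun p => p.1)) (fun x => x)
  · exact ((PySem.List.sorted_perm l (fun p => p.1) false).map (fun p => p.1)).trans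
      (PySem.List.sorted_perm (l.map (fun p => p.1)) (fun x => x) false).symm

theorem pv_seq_eq (max_index : Int) (max_value : Option Int) (t : String) (v : PySem.Set Int)
    (hk : pvKeys (pvA_loop3 t (PySem.List.pyRange 0 (max_index + 1) 1)
            (PySem.List.pyRange 0 (max_index + 1) 1) (PySem.Dict.mk [])) = v) :
    (match max_value with
      | none => (generate_reflections_with_permutations max_index t).map fun p => p.1
      | some m => ((generate_reflections_with_permutations max_index t).map fun p => p.1).filter
          fun x => x ≤ m)
      = pvB_seq max_value v := by
  have key : (generate_reflections_with_permutations max_index t).map (fun p => p.1)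
      = PySem.List.sorted v (fun x => x) := by
    unfold generate_reflections_with_permutations
    rw [pv_mapfst_sorted, ← hk]
    rfl
  cases max_value with
  | none => simpa [pvB_seq] using key
  | some m => simp [pvB_seq, key]

-- ===== VERDICT (by name: the statement is the Claim_ definition above) =====
theorem get_structure_sequences_spec : Claim_equal_get_structure_sequences := by
  intro max_index max_value _
  unfold Spec_get_structure_sequences get_structure_sequences get_structure_sequences_alt
  obtain ⟨K1, K2, K3, K4, K5⟩ := pvLoop3_inv (PySem.List.pyRange 0 (max_index + 1) 1)
    (PySem.List.pyRange 0 (max_index + 1) 1) (PySem.Dict.mk []) (PySem.Dict.mk [])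
    (PySem.Dict.mk []) (PySem.Dict.mk []) (PySem.Dict.mk []) ([], [], [], [], [])
    ⟨rfl, rfl, rfl, rfl, rfl⟩
  simp only [List.foldl_cons, List.foldl_nil,
    show PySem.Str.upper "sc" = "SC" from rfl, show PySem.Str.upper "bcc" = "BCC" from rfl,
    show PySem.Str.upper "fcc" = "FCC" from rfl,
    show PySem.Str.upper "diamond" = "DIAMOND" from rfl,
    show PySem.Str.upper "hcp" = "HCP" from rfl]
  simp only [PySem.Dict.insert, PySem.Dict.contains, List.any_nil]
  rw [pv_seq_eq max_index max_value "sc" _ K1, pv_seq_eq max_index max_value "bcc" _ K2,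
    pv_seq_eq max_index max_value "fcc" _ K3, pv_seq_eq max_index max_value "diamond" _ K4,
    pv_seq_eq max_index max_value "hcp" _ K5]
  simp
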